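-- pv_equiv track=rewrite | github.com/jpwl/harmonic_intervals_for_chords | script_so_far.py | collect_tetras
-- ===== SOURCE A (Python) =====
-- def collect_tetras(steps, version): # get modes
--     tetras_total = []
--     for scale in steps:
--         for i in range(len(scale)):
--             a = i
--             b = (i+1) % len(scale)
--             c = (i+2) % len(scale)
--             if version == 'chords':
--                 d = (i+3) % len(scale)
--                 tetra = [scale[a], scale[b], scale[c], scale[d]]
--             if version == 'notes':
--                 tetra = [scale[a], scale[b], scale[c]]
--             tetras_total.append(tetra)
--     return tetras_total
-- ===== SOURCE B (Python) =====
-- def collect_tetras(steps, version):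
--     w = 4 if version == 'chords' else 3
--     return [(scale * w)[i:i + w] for scale in steps for i in range(len(scale))]
-- ===== Notes on version B (the rewrite author's own statement) =====
-- stated objective: idiomatic
-- what changed: Replaces the per-index modular-arithmetic inner loop building each window element by element with wrap-around by repetition-and-slicing: each scale is repeated w times and every window is one contiguous slice, flattened in a single comprehension.
import Mathlib
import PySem

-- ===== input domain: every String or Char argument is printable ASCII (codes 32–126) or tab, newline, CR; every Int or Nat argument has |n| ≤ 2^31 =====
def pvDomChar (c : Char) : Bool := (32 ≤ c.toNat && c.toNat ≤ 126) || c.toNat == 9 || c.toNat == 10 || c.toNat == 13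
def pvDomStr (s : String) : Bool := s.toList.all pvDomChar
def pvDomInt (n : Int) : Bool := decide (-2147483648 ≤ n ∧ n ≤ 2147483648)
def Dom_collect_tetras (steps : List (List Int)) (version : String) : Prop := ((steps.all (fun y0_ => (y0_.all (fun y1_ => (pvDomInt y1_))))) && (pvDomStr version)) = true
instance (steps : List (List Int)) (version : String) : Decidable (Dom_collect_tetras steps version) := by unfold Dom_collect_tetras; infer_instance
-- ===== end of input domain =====

-- B replaces A's element-by-element modular indexing by wrap-around via repetition-and-slicing
-- (each scale repeated w times, windows are contiguous slices), flattened in one comprehension; objective: idiomatic.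

-- ===== PORT A =====
def collect_tetras (steps : List (List Int)) (version : String) : List (List Int) :=
  steps.foldl (fun tetras_total scale =>
    (PySem.List.pyRange 0 (scale.length : Int) 1).foldl (fun acc i =>
      let a : Int := i
      let b : Int := PySem.Int.mod (i + 1) (scale.length : Int)
      let c : Int := PySem.Int.mod (i + 2) (scale.length : Int)
      let tetra : List Int :=
        if version = "chords" then
          let d : Int := PySem.Int.mod (i + 3) (scale.length : Int)
          [PySem.List.pyGetD scale a 0, PySem.List.pyGetD scale b 0,
           PySem.List.pyGetD scale c 0, PySem.List.pyGetD scale d 0]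
        else if version = "notes" then
          [PySem.List.pyGetD scale a 0, PySem.List.pyGetD scale b 0,
           PySem.List.pyGetD scale c 0]
        else []  -- Python raises UnboundLocalError here (tetra unbound); excluded by Pre_
      acc ++ [tetra]) tetras_total) []

-- ===== PORT B =====
def collect_tetras_alt (steps : List (List Int)) (version : String) : List (List Int) :=
  let w : Int := if version = "chords" then 4 else 3
  steps.flatMap (fun scale =>
    (PySem.List.pyRange 0 (scale.length : Int) 1).map (fun i =>
      PySem.List.slice (PySem.List.pyRepeat scale w) (some i) (some (i + w))))

-- ===== PRECONDITION & SPEC =====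
-- Pre_ excludes exactly the inputs on which A raises UnboundLocalError: an unknown version
-- string together with at least one non-empty scale (tetra is then never assigned).
def Pre_collect_tetras (steps : List (List Int)) (version : String) : Prop :=
  version = "chords" ∨ version = "notes" ∨ ∀ s ∈ steps, s = []
instance (steps : List (List Int)) (version : String) : Decidable (Pre_collect_tetras steps version) := by unfold Pre_collect_tetras; infer_instance
def pvWitness_collect_tetras : List (List Int) × String := ([[0, 2, 4, 5, 7, 9, 11]], "chords")

def Spec_collect_tetras (steps : List (List Int)) (version : String) (out : List (List Int)) : Prop := out = collect_tetras_alt steps version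
instance (steps : List (List Int)) (version : String) (out : List (List Int)) : Decidable (Spec_collect_tetras steps version out) := by unfold Spec_collect_tetras; infer_instance

-- ===== CLAIM (what is proved, stated in full; the proofs are below) =====
def Claim_equal_collect_tetras : Prop := ∀ (steps : List (List Int)) (version : String), Dom_collect_tetras steps version → Pre_collect_tetras steps version → Spec_collect_tetras steps version (collect_tetras steps version)

-- ===== LEMMAS AND PROOFS =====

-- element j of scale repeated m times is scale[j % len]
lemma rep_getElem? (xs : List Int) (m j : Nat) (hj : j < xs.length * m) :
    ((List.replicate m xs).flatten)[j]? = xs[j % xs.length]? := by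
  induction m generalizing j with
  | zero => simp at hj
  | succ m ih =>
    rw [List.replicate_succ, List.flatten_cons]
    rcases lt_or_ge j xs.length with h | h
    · rw [List.getElem?_append_left h, Nat.mod_eq_of_lt h]
    · rw [List.getElem?_append_right h, ih]
      · rw [← Nat.mod_eq_sub_mod h]
      · have : xs.length * (m + 1) = xs.length * m + xs.length := by ring
        omega

-- B's slice window, characterised pointwise through Nat mod
lemma window_eq (scale : List Int) (w : Nat) (hw : 1 ≤ w) (k : Nat) (hk : k < scale.length) :
    PySem.List.slice (PySem.List.pyRepeat scale (w : Int)) (some (k : Int)) (some ((k : Int) + (w : Int))) =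
    (List.range w).map (fun t => scale.getD ((k + t) % scale.length) 0) := by
  have hrep : PySem.List.pyRepeat scale (w : Int) = (List.replicate w scale).flatten := by
    simp [PySem.List.pyRepeat]
  have hmul : k + w ≤ scale.length * w := by nlinarith
  rw [hrep, PySem.List.slice_natCast_add]
  apply List.ext_getElem?
  intro t
  rcases lt_or_ge t w with ht | ht
  · have h1 : k + t < scale.length * w := by omega
    rw [List.getElem?_take_of_lt ht, List.getElem?_drop, rep_getElem? _ _ _ h1,
        List.getElem?_map, List.getElem?_range ht]
    have hmod : (k + t) % scale.length < scale.length := Nat.mod_lt _ (by omega)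
    rw [List.getElem?_eq_getElem hmod]
    simp [List.getD_eq_getElem?_getD, List.getElem?_eq_getElem hmod]
  · rw [List.getElem?_take_eq_none ht]
    rw [List.getElem?_eq_none (by simpa using ht)]

-- A's indexing, through Nat mod
lemma pyget_mod (scale : List Int) (a : Nat) :
    PySem.List.pyGetD scale (PySem.Int.mod (a : Int) (scale.length : Int)) 0 =
    scale.getD (a % scale.length) 0 := by
  rw [PySem.Int.mod_natCast, PySem.List.pyGetD_natCast]

-- first index needs no mod
lemma pyget_self (scale : List Int) (k : Nat) (hk : k < scale.length) :
    PySem.List.pyGetD scale (k : Int) 0 = scale.getD (k % scale.length) 0 := by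
  rw [PySem.List.pyGetD_natCast, Nat.mod_eq_of_lt hk]

lemma tetra4 (scale : List Int) (k : Nat) (hk : k < scale.length) :
    [PySem.List.pyGetD scale (k : Int) 0,
     PySem.List.pyGetD scale (PySem.Int.mod ((k : Int) + 1) (scale.length : Int)) 0,
     PySem.List.pyGetD scale (PySem.Int.mod ((k : Int) + 2) (scale.length : Int)) 0,
     PySem.List.pyGetD scale (PySem.Int.mod ((k : Int) + 3) (scale.length : Int)) 0] =
    PySem.List.slice (PySem.List.pyRepeat scale (4 : Int)) (some (k : Int)) (some ((k : Int) + 4)) := by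
  have h4 : ((4 : Nat) : Int) = (4 : Int) := by norm_num
  rw [← h4, window_eq scale 4 (by norm_num) k hk]
  have e1 : ((k : Int) + 1) = (((k + 1 : Nat)) : Int) := by push_cast; ring
  have e2 : ((k : Int) + 2) = (((k + 2 : Nat)) : Int) := by push_cast; ring
  have e3 : ((k : Int) + 3) = (((k + 3 : Nat)) : Int) := by push_cast; ring
  rw [e1, e2, e3, pyget_mod, pyget_mod, pyget_mod, pyget_self scale k hk]
  simp [List.range_succ]

lemma tetra3 (scale : List Int) (k : Nat) (hk : k < scale.length) :
    [PySem.List.pyGetD scale (k : Int) 0,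
     PySem.List.pyGetD scale (PySem.Int.mod ((k : Int) + 1) (scale.length : Int)) 0,
     PySem.List.pyGetD scale (PySem.Int.mod ((k : Int) + 2) (scale.length : Int)) 0] =
    PySem.List.slice (PySem.List.pyRepeat scale (3 : Int)) (some (k : Int)) (some ((k : Int) + 3)) := by
  have h3 : ((3 : Nat) : Int) = (3 : Int) := by norm_num
  rw [← h3, window_eq scale 3 (by norm_num) k hk]
  have e1 : ((k : Int) + 1) = (((k + 1 : Nat)) : Int) := by push_cast; ring
  have e2 : ((k : Int) + 2) = (((k + 2 : Nat)) : Int) := by push_cast; ring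
  rw [e1, e2, pyget_mod, pyget_mod, pyget_self scale k hk]
  simp [List.range_succ]

-- ===== VERDICT (by name: the statement is the Claim_ definition above) =====
theorem collect_tetras_spec : Claim_equal_collect_tetras := by
  intro steps version _ hpre
  unfold Spec_collect_tetras
  rcases hpre with h | h | h
  · subst h
    simp only [collect_tetras, collect_tetras_alt,
               PySem.List.foldl_append_singleton_eq_map, PySem.List.foldl_append_eq_flatMap,
               List.nil_append]
    refine List.flatMap_congr (fun scale _ => ?_)
    refine List.map_congr_left (fun i hi => ?_)
    obtain ⟨h0, hlt⟩ := (PySem.List.mem_pyRange_one).1 hi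
    have hik : i = ((i.toNat : Nat) : Int) := (Int.toNat_of_nonneg h0).symm
    rw [hik]
    exact tetra4 scale i.toNat (by omega)
  · subst h
    simp only [collect_tetras, collect_tetras_alt,
               PySem.List.foldl_append_singleton_eq_map, PySem.List.foldl_append_eq_flatMap,
               List.nil_append]
    norm_num
    refine List.flatMap_congr (fun scale _ => ?_)
    refine List.map_congr_left (fun i hi => ?_)
    obtain ⟨h0, hlt⟩ := (PySem.List.mem_pyRange_one).1 hi
    have hik : i = ((i.toNat : Nat) : Int) := (Int.toNat_of_nonneg h0).symm
    rw [hik]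
    exact tetra3 scale i.toNat (by omega)
  · simp only [collect_tetras, collect_tetras_alt,
               PySem.List.foldl_append_singleton_eq_map, PySem.List.foldl_append_eq_flatMap,
               List.nil_append]
    rw [List.flatMap_eq_nil_iff.2, List.flatMap_eq_nil_iff.2]
    · intro s hs; rw [h s hs]; simp
    · intro s hs; rw [h s hs]; simp
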